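-- pv_equiv track=rewrite | github.com/TwineTickler/storage | week3_hw.py | lower_first_rest_upper
-- ===== SOURCE A (Python) =====
-- def lower_first_rest_upper(s):
--     l = s.split(" ")
--     new_word = str()
--     new_sentence = str()
--     for word in l:
--         for ind, letter in enumerate(word):
--             if ind == 0:
--                 new_word += letter.lower()
--             else:
--                 new_word += letter.upper()
--         new_sentence += new_word + " "
--         new_word = ""
--     new_sentence = new_sentence[0:-1]
--     return(new_sentence)
-- ===== SOURCE B (Python) =====
-- def lower_first_rest_upper(s):
--     out = []
--     start_of_word = True
--     for c in s:
--         if c == " ":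
--             out.append(" ")
--             start_of_word = True
--         elif start_of_word:
--             out.append(c.lower())
--             start_of_word = False
--         else:
--             out.append(c.upper())
--     return "".join(out)
-- ===== Notes on version B (the rewrite author's own statement) =====
-- stated objective: simpler
-- what changed: Replaced split-on-space plus a nested per-word enumerate loop and a final trailing-space slice by a single stateful pass over the characters with a start-of-word flag, accumulating into a list joined once.
import Mathlib
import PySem

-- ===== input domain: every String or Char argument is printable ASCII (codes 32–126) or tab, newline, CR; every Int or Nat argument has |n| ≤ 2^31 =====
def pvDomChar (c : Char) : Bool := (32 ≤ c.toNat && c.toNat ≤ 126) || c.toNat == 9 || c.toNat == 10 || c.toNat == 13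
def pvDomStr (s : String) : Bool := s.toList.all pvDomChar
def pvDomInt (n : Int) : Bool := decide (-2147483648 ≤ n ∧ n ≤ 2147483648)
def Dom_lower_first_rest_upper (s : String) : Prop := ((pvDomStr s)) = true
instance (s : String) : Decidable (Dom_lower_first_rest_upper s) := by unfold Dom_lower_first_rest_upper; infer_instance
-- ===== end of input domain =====

-- B replaces A's split(" ") + nested per-word loop + trailing-slice by one simpler
-- stateful pass over the characters with a start-of-word flag.

-- ===== PORT A =====
-- the inner 'for ind, letter in enumerate(word)' loop building new_word
def pvA_word (w : List Char) : List Char :=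
  (PySem.List.enumerate w).foldl
    (fun nw p => nw ++ [if p.1 == 0 then PySem.Chars.lowerChar p.2 else PySem.Chars.upperChar p.2]) []

def lower_first_rest_upper (s : String) : String :=
  -- l = s.split(" "): sep is nonempty, so split? always returns some; getD [] is unreachable
  let l := (PySem.Chars.split? s.toList " ".toList).getD []
  let ns := l.foldl (fun ns w => ns ++ (pvA_word w ++ [' '])) []
  String.ofList (PySem.Chars.slice ns (some 0) (some (-1)))

-- ===== PORT B =====
-- one loop iteration: space resets the flag; otherwise lower at word start, upper inside
def pvB_step (st : List Char × Bool) (c : Char) : List Char × Bool :=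
  if c == ' ' then (st.1 ++ [' '], true)
  else if st.2 then (st.1 ++ [PySem.Chars.lowerChar c], false)
  else (st.1 ++ [PySem.Chars.upperChar c], false)

def lower_first_rest_upper_alt (s : String) : String :=
  String.ofList (s.toList.foldl pvB_step ([], true)).1

-- ===== PRECONDITION & SPEC =====
def Spec_lower_first_rest_upper (s : String) (out : String) : Prop := out = lower_first_rest_upper_alt s
instance (s : String) (out : String) : Decidable (Spec_lower_first_rest_upper s out) := by unfold Spec_lower_first_rest_upper; infer_instance

-- ===== CLAIM (what is proved, stated in full; the proofs are below) =====
def Claim_equal_lower_first_rest_upper : Prop := ∀ (s : String), Dom_lower_first_rest_upper s → Spec_lower_first_rest_upper s (lower_first_rest_upper s)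

-- ===== LEMMAS AND PROOFS =====

-- functional characterisation of split(" ") : first word and remaining words
def pvSplit : List Char → List Char × List (List Char)
  | [] => ([], [])
  | c :: r =>
    let p := pvSplit r
    if c = ' ' then ([], p.1 :: p.2) else (c :: p.1, p.2)

theorem pvSplit_go (fuel : Nat) : ∀ (l cur : List Char) (acc : List (List Char)),
    l.length < fuel →
    PySem.Chars.splitOn.go [' '] fuel l cur acc
      = acc.reverse ++ (cur.reverse ++ (pvSplit l).1) :: (pvSplit l).2 := by
  induction fuel with
  | zero => intro l cur acc h; omega
  | succ n ih =>
    intro l cur acc h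
    cases l with
    | nil => simp [PySem.Chars.splitOn.go, pvSplit]
    | cons c rest =>
      by_cases hc : c = ' '
      · subst hc
        rw [PySem.Chars.splitOn.go]
        simp only [List.isPrefixOf, List.length_cons] at *
        rw [if_pos (by simp)]
        simp only [List.length_nil, List.drop_succ_cons, List.drop_zero]
        rw [ih rest [] (cur.reverse :: acc) (by simpa using h)]
        simp [pvSplit]
      · rw [PySem.Chars.splitOn.go]
        rw [if_neg (by simp [List.isPrefixOf]; exact fun h => hc h.symm)]
        rw [ih rest (c :: cur) acc (by simp at h ⊢; omega)]
        simp [pvSplit, hc]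

theorem splitOn_space (l : List Char) :
    PySem.Chars.splitOn l [' '] = (pvSplit l).1 :: (pvSplit l).2 := by
  unfold PySem.Chars.splitOn
  rw [pvSplit_go (l.length + 1) l [] [] (by omega)]
  simp

-- the inner word loop: all indices ≥ 1 give upper-case
theorem pvA_word_tail (w : List Char) : ∀ (k : Int) (acc : List Char), 1 ≤ k →
    (PySem.List.enumerate w k).foldl
      (fun nw p => nw ++ [if p.1 == 0 then PySem.Chars.lowerChar p.2 else PySem.Chars.upperChar p.2]) acc
      = acc ++ w.map PySem.Chars.upperChar := by
  induction w with
  | nil => intro k acc h; simp [PySem.List.enumerate]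
  | cons c r ih =>
    intro k acc h
    rw [PySem.List.enumerate]
    simp only [List.foldl_cons]
    rw [if_neg (by simp; omega)]
    rw [ih (k + 1) _ (by omega)]
    simp

theorem pvA_word_nil : pvA_word [] = [] := by simp [pvA_word, PySem.List.enumerate]

theorem pvA_word_cons (c : Char) (r : List Char) :
    pvA_word (c :: r) = PySem.Chars.lowerChar c :: r.map PySem.Chars.upperChar := by
  unfold pvA_word
  rw [PySem.List.enumerate]
  simp only [List.foldl_cons]
  rw [if_pos (by simp)]
  rw [pvA_word_tail r (0 + 1) _ (by omega)]
  simp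

-- B's loop as a pure recursion
def pvPass : List Char → Bool → List Char
  | [], _ => []
  | c :: r, flag =>
    if c = ' ' then ' ' :: pvPass r true
    else if flag then PySem.Chars.lowerChar c :: pvPass r false
    else PySem.Chars.upperChar c :: pvPass r false

theorem pvB_fold (l : List Char) : ∀ (acc : List Char) (flag : Bool),
    (l.foldl pvB_step (acc, flag)).1 = acc ++ pvPass l flag := by
  induction l with
  | nil => intro acc flag; simp [pvPass]
  | cons c r ih =>
    intro acc flag
    by_cases hc : c = ' '
    · subst hc; simp [pvB_step, pvPass, ih]
    · cases flag <;> simp [pvB_step, pvPass, hc, ih]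

def pvWf (w : List Char) : List Char := pvA_word w ++ [' ']

-- the single pass agrees with the split-and-recase pipeline, for both flag values
theorem pvPass_split (l : List Char) :
    (pvPass l true ++ [' '] = (pvA_word (pvSplit l).1 ++ [' ']) ++ (pvSplit l).2.flatMap pvWf)
    ∧ (pvPass l false ++ [' ']
        = ((pvSplit l).1.map PySem.Chars.upperChar ++ [' ']) ++ (pvSplit l).2.flatMap pvWf) := by
  induction l with
  | nil => simp [pvPass, pvSplit, pvA_word_nil]
  | cons c r ih =>
    by_cases hc : c = ' '
    · subst hc
      constructor <;> simp [pvPass, pvSplit, pvA_word_nil, pvWf, ih.1]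
    · simp only [pvPass, pvSplit, if_neg hc]
      constructor
      · simp [pvA_word_cons, ih.2]
      · simp [ih.2]

-- ===== VERDICT (by name: the statement is the Claim_ definition above) =====
theorem lower_first_rest_upper_spec : Claim_equal_lower_first_rest_upper := by
  intro s _
  unfold Spec_lower_first_rest_upper lower_first_rest_upper lower_first_rest_upper_alt
  have hsep : (" " : String).toList = [' '] := by decide
  rw [hsep]
  rw [PySem.Chars.split?, if_neg (by decide)]
  simp only [Option.getD_some]
  rw [splitOn_space]
  rw [List.foldl_cons]
  rw [PySem.List.foldl_append_eq_flatMap (fun w => pvA_word w ++ [' '])]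
  rw [pvB_fold]
  simp only [List.nil_append]
  have h : pvPass s.toList true ++ [' ']
      = (pvA_word (pvSplit s.toList).1 ++ [' '])
        ++ (pvSplit s.toList).2.flatMap (fun w => pvA_word w ++ [' ']) := by
    simpa [pvWf] using (pvPass_split s.toList).1
  rw [PySem.Chars.slice_eq_listSlice, PySem.List.slice_zero_start, PySem.List.slice_to_neg_one]
  rw [← h]
  simp
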